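-- pv_equiv track=rewrite | github.com/alexandrebatista84/fundamentos-programacao | Aula Prática 4/Exercicio9.py | seg
-- ===== SOURCE A (Python) =====
-- def ter(n):
--     for i in n:
--         if (not i=='c'):
--             return False
--     return True
--
-- def seg(n):
--     if len(n)<3:
--         return False
--     if ((n[0]=='b') & (ter(n[1:len(n)-1])) & (n[len(n)-1]=='b')):
--         return True
--     if ((n[0]=='b') & (seg(n[1:len(n)-1])) & (n[len(n)-1]=='b')):
--         return True
--     return False
-- ===== SOURCE B (Python) =====
-- def seg(n):
--     stripped = n.lstrip('b')
--     i = len(n) - len(stripped)          # leading b's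
--     mid = stripped.rstrip('b')
--     j = len(stripped) - len(mid)        # trailing b's (after the leading block)
--     return i >= 1 and i == j and mid != '' and all(ch == 'c' for ch in mid)
-- ===== Notes on version B (the rewrite author's own statement) =====
-- stated objective: faster
-- what changed: A recognizes b^k c^m b^k by recursively slicing one 'b' off each end (O(n^2) from repeated slicing/scanning); B does a single linear pass: count the leading 'b' block, count the trailing 'b' block, and check the counts are equal and positive and the nonempty middle is all 'c'.
import Mathlib
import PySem

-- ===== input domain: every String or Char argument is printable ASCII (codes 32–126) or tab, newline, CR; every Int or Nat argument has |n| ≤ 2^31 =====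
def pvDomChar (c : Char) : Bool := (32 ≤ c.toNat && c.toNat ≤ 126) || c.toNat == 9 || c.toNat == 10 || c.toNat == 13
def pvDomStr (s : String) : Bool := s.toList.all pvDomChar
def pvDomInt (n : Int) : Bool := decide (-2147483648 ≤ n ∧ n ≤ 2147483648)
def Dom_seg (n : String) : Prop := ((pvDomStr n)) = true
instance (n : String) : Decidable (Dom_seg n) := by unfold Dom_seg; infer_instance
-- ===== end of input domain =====

-- B replaces A's O(n^2) recursion (strip one 'b' from each end per level, with slicing)
-- by one linear pass: count the leading and trailing 'b' blocks and check the middle is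
-- nonempty and all 'c'.  Objective: faster (asymptotic).

-- ===== PORT A =====
-- ter(n): for i in n: if not i == 'c': return False; return True
def terC : List Char → Bool
  | [] => true
  | i :: rest => if ¬(i = 'c') then false else terC rest

-- seg, recursively on the character list of n (string ops are slicing/indexing only).
-- Indices 0 and len-1 are in range under the len ≥ 3 guard, so pyGetD's default is never used.
def segC (l : List Char) : Bool :=
  if l.length < 3 then false
  else
    let first := PySem.List.pyGetD l 0 ' '
    let last := PySem.List.pyGetD l ((l.length : Int) - 1) ' '
    let mid := PySem.List.slice l (some 1) (some ((l.length : Int) - 1))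
    if (first = 'b') && terC mid && (last = 'b') then true
    else if (first = 'b') && segC mid && (last = 'b') then true
    else false
termination_by l.length
decreasing_by
  rw [PySem.List.slice_of_nonneg l (by omega) (by omega) (by omega) (by omega)]
  simp only [List.length_take, List.length_drop]
  omega

def seg (n : String) : Bool := segC n.toList

-- ===== PORT B =====
-- stripped = n.lstrip('b'); i = len(n) - len(stripped); mid = stripped.rstrip('b');
-- j = len(stripped) - len(mid); return i >= 1 and i == j and mid != '' and all(ch == 'c' for ch in mid)
-- lstrip('b') / rstrip('b') are ported by hand as dropWhile on the list / reversed list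
-- (exact: they drop precisely the maximal leading/trailing run of 'b').
def altC (l : List Char) : Bool :=
  let stripped := l.dropWhile (· = 'b')
  let i := l.length - stripped.length
  let mid := (stripped.reverse.dropWhile (· = 'b')).reverse
  let j := stripped.length - mid.length
  decide (1 ≤ i) && decide (i = j) && !(mid.isEmpty) && mid.all (· = 'c')

def seg_alt (n : String) : Bool := altC n.toList

-- ===== PRECONDITION & SPEC =====
def Spec_seg (n : String) (out : Bool) : Prop := out = seg_alt n
instance (n : String) (out : Bool) : Decidable (Spec_seg n out) := by unfold Spec_seg; infer_instance

-- ===== CLAIM (what is proved, stated in full; the proofs are below) =====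
def Claim_equal_seg : Prop := ∀ (n : String), Dom_seg n → Spec_seg n (seg n)

-- ===== LEMMAS AND PROOFS =====

theorem terC_eq_all (m : List Char) : terC m = m.all (· = 'c') := by
  induction m with
  | nil => rfl
  | cons x xs ih =>
      simp only [terC, List.all_cons, ih]
      by_cases h : x = 'c' <;> simp [h]

theorem altC_short (l : List Char) (h : l.length < 3) : altC l = false := by
  match l, h with
  | [], _ => rfl
  | [x], _ =>
      by_cases hx : x = 'b' <;> simp [altC, List.dropWhile, hx]
  | [x, y], _ =>
      by_cases hx : x = 'b' <;> by_cases hy : y = 'b' <;>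
        simp [altC, List.dropWhile, hx, hy]

theorem altC_last_ne (m : List Char) (z : Char) (hz : ¬ z = 'b') :
    altC (m ++ [z]) = false := by
  have hstr : (m ++ [z]).dropWhile (· = 'b') = m.dropWhile (· = 'b') ++ [z] := by
    rw [List.dropWhile_append]
    split
    · simp_all [List.dropWhile]
      assumption
    · rfl
  have hlen := List.length_dropWhile_le (p := (· = 'b')) (l := m)
  simp only [altC, hstr, List.reverse_append, List.reverse_cons, List.reverse_nil,
    List.nil_append, List.singleton_append, List.dropWhile_cons]
  simp only [hz, decide_false, Bool.false_eq_true, if_false, List.reverse_cons,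
    List.reverse_reverse, List.length_append, List.length_cons, List.length_nil]
  by_cases hi : m.length = (List.dropWhile (· = 'b') m).length <;> simp [hi] <;> omega

theorem altC_head_ne (a : Char) (t : List Char) (ha : ¬ a = 'b') :
    altC (a :: t) = false := by
  simp [altC, List.dropWhile, ha]

-- dropWhile that removes something: head satisfies p and length strictly drops
theorem dropWhile_ne_self {p : Char → Bool} {l : List Char}
    (h : List.dropWhile p l ≠ l) :
    ∃ y ys, l = y :: ys ∧ p y = true ∧ List.dropWhile p l = List.dropWhile p ys := by
  match l with
  | [] => simp at h
  | y :: ys =>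
    by_cases hy : p y
    · exact ⟨y, ys, rfl, hy, by simp [hy]⟩
    · simp [hy] at h

theorem altC_rec (m : List Char) :
    altC ('b' :: m ++ ['b']) = ((!m.isEmpty) && m.all (· = 'c') || altC m) := by
  match m with
  | [] => decide
  | x :: xs =>
    by_cases hx : x = 'b'
    · subst hx
      by_cases hd : List.dropWhile (· = 'b') xs = []
      · simp [altC, List.dropWhile_append, hd]
      · simp only [altC]
        simp [altC, List.dropWhile_append, hd]
        have h1 : (List.dropWhile (fun x => decide (x = 'b')) xs).length ≤ xs.length :=
          List.length_dropWhile_le _ _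
        have h2 : (List.dropWhile (fun x => decide (x = 'b'))
            (List.dropWhile (fun x => decide (x = 'b')) xs).reverse).length ≤
            (List.dropWhile (fun x => decide (x = 'b')) xs).length := by
          calc _ ≤ (List.dropWhile (fun x => decide (x = 'b')) xs).reverse.length :=
                List.length_dropWhile_le _ _
            _ = _ := List.length_reverse
        have e1 : (1 ≤ xs.length + 2 - (List.dropWhile (fun x => decide (x = 'b')) xs).length) := by omega
        have e2 : (1 ≤ xs.length + 1 - (List.dropWhile (fun x => decide (x = 'b')) xs).length) := by omega
        have e3 : (xs.length + 2 - (List.dropWhile (fun x => decide (x = 'b')) xs).length =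
              (List.dropWhile (fun x => decide (x = 'b')) xs).length + 1 -
                (List.dropWhile (fun x => decide (x = 'b'))
                    (List.dropWhile (fun x => decide (x = 'b')) xs).reverse).length) ↔
            (xs.length + 1 - (List.dropWhile (fun x => decide (x = 'b')) xs).length =
              (List.dropWhile (fun x => decide (x = 'b')) xs).length -
                (List.dropWhile (fun x => decide (x = 'b'))
                    (List.dropWhile (fun x => decide (x = 'b')) xs).reverse).length) := by
          omega
        simp [e1, e2, e3]
    · simp [altC, List.dropWhile_append, hx]
      by_cases hall : ∀ y ∈ xs, y = 'b'
      · match xs, hall with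
        | [], _ => simp
        | y :: ys, hall =>
          have hy : y = 'b' := hall y (by simp)
          have h2 : ∀ a ∈ ys, a = 'b' := fun a ha => hall a (by simp [ha])
          simp [hy, if_pos h2]
      · by_cases hK : List.dropWhile (fun x => decide (x = 'b')) xs.reverse = xs.reverse
        · have hKlen : (List.dropWhile (fun x => decide (x = 'b')) xs.reverse).length = xs.length := by
            rw [hK, List.length_reverse]
          simp [hK, hKlen, hall]
          rw [show (xs.reverse ++ [x]).isEmpty = false from by simp]
          simp [Bool.and_comm]
        · obtain ⟨y, ys, hrev, hpy, hdw⟩ := dropWhile_ne_self hK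
          have hlen1 : xs.length = ys.length + 1 := by
            have := congrArg List.length hrev; simpa using this
          have hdwlen := congrArg List.length hdw
          have hylen : (List.dropWhile (fun x => decide (x = 'b')) xs.reverse).length < xs.length := by
            have := List.length_dropWhile_le (fun x => decide (x = 'b')) ys
            omega
          have hmem : ('b' : Char) ∈ xs := by
            have : y ∈ xs.reverse := by rw [hrev]; simp
            have hy : y = 'b' := by simpa using hpy
            rw [hy] at this; simpa using this
          have hnotall : ¬ (∀ y ∈ xs, y = 'c') := by
            intro h; have := h _ hmem; simp at this
          have hfalse : (xs.all fun x => decide (x = 'c')) = false := by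
            simpa using hnotall
          simp [if_neg hall, hfalse]
          omega

theorem segC_compute (a z : Char) (m : List Char) (hm : 1 ≤ m.length) :
    segC (a :: m ++ [z]) =
      (if (a = 'b') && terC m && (z = 'b') then true
       else if (a = 'b') && segC m && (z = 'b') then true else false) := by
  have hlen : (a :: m ++ [z]).length = m.length + 2 := by simp
  have hge : ¬ ((a :: m ++ [z]).length < 3) := by rw [hlen]; omega
  rw [segC, if_neg hge]
  have hfirst : PySem.List.pyGetD (a :: m ++ [z]) 0 ' ' = a := by
    rw [PySem.List.pyGetD_eq_getElem _ _ le_rfl (by rw [hlen]; push_cast; omega)]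
    simp
  have hlast : PySem.List.pyGetD (a :: m ++ [z]) (((a :: m ++ [z]).length : Int) - 1) ' ' = z := by
    rw [PySem.List.pyGetD_eq_getElem _ _ (by rw [hlen]; push_cast; omega)
      (by rw [hlen]; push_cast; omega)]
    have : ((((a :: m ++ [z]).length : Int)) - 1).toNat = m.length + 1 := by
      rw [hlen]; omega
    simp only [this]
    show ((a :: m) ++ [z])[(a :: m).length]'(by simp) = z
    exact List.getElem_concat_length rfl _
  have hmid : PySem.List.slice (a :: m ++ [z]) (some 1) (some (((a :: m ++ [z]).length : Int) - 1)) = m := by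
    rw [PySem.List.slice_of_nonneg _ (by omega) (by rw [hlen]; push_cast; omega)
      (by rw [hlen]; push_cast; omega) (by rw [hlen]; push_cast; omega)]
    have h1 : ((1 : Int)).toNat = 1 := rfl
    have h2 : ((((a :: m ++ [z]).length : Int)) - 1).toNat = m.length + 1 := by
      rw [hlen]; omega
    rw [h1, h2]
    show (m ++ [z]).take (m.length + 1 - 1) = m
    rw [Nat.add_sub_cancel]
    exact List.take_left
  rw [hfirst, hlast, hmid]

theorem segC_eq_altC (l : List Char) : segC l = altC l := by
  suffices H : ∀ n (l : List Char), l.length = n → segC l = altC l from H _ l rfl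
  intro n
  induction n using Nat.strong_induction_on with
  | _ n ih =>
    intro l hl
    by_cases h3 : l.length < 3
    · rw [segC, if_pos h3, altC_short l h3]
    · obtain ⟨a, t, rfl⟩ : ∃ a t, l = a :: t := by
        cases l with
        | nil => simp at h3
        | cons a t => exact ⟨a, t, rfl⟩
      obtain ⟨m, z, rfl⟩ : ∃ m z, t = m ++ [z] := by
        refine ⟨t.dropLast, t.getLast (by intro h; subst h; simp at h3), ?_⟩
        exact (List.dropLast_append_getLast _).symm
      rw [← List.cons_append]
      rw [segC_compute a z m (by simp at h3; omega)]
      by_cases ha : a = 'b'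
      · by_cases hz : z = 'b'
        · subst ha; subst hz
          have hm : m.length < n := by simp at hl; omega
          have hmne : m.isEmpty = false := by
            have : 1 ≤ m.length := by simp at h3; omega
            cases m with
            | nil => simp at this
            | cons _ _ => rfl
          rw [altC_rec, ih m.length hm m rfl, terC_eq_all, hmne]
          by_cases hall : m.all (· = 'c') = true <;> simp [hall]
        · rw [show (a :: m) ++ [z] = (a :: m) ++ [z] from rfl] at *
          rw [show altC (a :: m ++ [z]) = false from altC_last_ne (a :: m) z hz]
          simp [hz]
      · rw [List.cons_append, altC_head_ne a _ ha]
        simp [ha]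

-- ===== VERDICT (by name: the statement is the Claim_ definition above) =====
theorem seg_spec : Claim_equal_seg := by
  intro n _
  unfold Spec_seg seg seg_alt
  exact segC_eq_altC n.toList
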